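-- pv_equiv track=rewrite | github.com/HomenShum/nodebench-qa | daas/compile_down/playbook_induction.py | _dominant_class
-- ===== SOURCE A (Python) =====
-- def _dominant_class(tool_classes: list[str], method: list[str]) -> str:
--     if method:
--         # Count occurrences within method
--         counts: dict[str, int] = {}
--         for c in method:
--             counts[c] = counts.get(c, 0) + 1
--         return max(counts, key=counts.get)
--     if tool_classes:
--         return tool_classes[0]
--     return ""
-- ===== SOURCE B (Python) =====
-- def _dominant_class(tool_classes: list[str], method: list[str]) -> str:
--     if method:
--         best, bc = None, 0
--         m = method
--         while m:
--             h = m[0]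
--             rest = [x for x in m if x != h]
--             ch = len(m) - len(rest)
--             if best is None or ch > bc:
--                 best, bc = h, ch
--             m = rest
--         return best
--     if tool_classes:
--         return tool_classes[0]
--     return ""
-- ===== Notes on version B (the rewrite author's own statement) =====
-- stated objective: alternative
-- what changed: Replaces A's one-pass frequency dictionary plus keyed max over its keys with a repeated-partition loop: strip every copy of the current leading class with a list filter, compare its count (taken as the length drop) against the best so far, and iterate on the remainder; no hash table and no key-function max.
import Mathlib
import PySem

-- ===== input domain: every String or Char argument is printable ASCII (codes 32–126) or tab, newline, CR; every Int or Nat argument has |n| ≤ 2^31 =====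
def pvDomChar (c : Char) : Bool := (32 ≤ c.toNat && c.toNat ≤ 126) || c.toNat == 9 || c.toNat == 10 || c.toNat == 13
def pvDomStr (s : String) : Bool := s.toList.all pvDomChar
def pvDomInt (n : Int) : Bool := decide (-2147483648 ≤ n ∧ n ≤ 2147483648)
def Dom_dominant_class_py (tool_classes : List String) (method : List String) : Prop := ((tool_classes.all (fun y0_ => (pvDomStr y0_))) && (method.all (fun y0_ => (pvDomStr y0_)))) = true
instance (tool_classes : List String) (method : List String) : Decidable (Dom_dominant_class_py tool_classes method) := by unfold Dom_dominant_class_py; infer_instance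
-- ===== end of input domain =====

-- B replaces A's frequency dictionary and keyed max with a repeated-partition loop
-- (strip every copy of the current leading class by filtering, keep the best count so far);
-- alternative decomposition, not claimed faster.

-- ===== PORT A =====
-- A: build a count dict over method, then max over its keys with key counts.get;
-- the dict's keys are nonempty when method is, so `.getD ""` never supplies its default.
def dominant_class_py (tool_classes : List String) (method : List String) : String :=
  if method ≠ [] then
    let counts : PySem.Dict String Int :=
      method.foldl (fun d c => d.insert c (d.getD c 0 + 1)) PySem.Dict.empty
    (PySem.List.max? counts.keys (fun c => counts.getD c 0)).getD ""
  else if tool_classes ≠ [] then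
    tool_classes.headD ""   -- tool_classes[0]; guard makes it total
  else ""

-- ===== PORT B =====
-- B's while loop: h = m[0]; rest = [x for x in m if x != h]; ch = len(m) - len(rest);
-- keep (h, ch) when best is None or ch > bc; continue on rest.
def bestLoopB (m : List String) (best : Option String) (bc : Int) : Option String :=
  match m with
  | [] => best
  | h :: t =>
    let rest := (h :: t).filter (fun x => x != h)
    let ch : Int := ((h :: t).length : Int) - (rest.length : Int)
    if best = none ∨ bc < ch then bestLoopB rest (some h) ch else bestLoopB rest best bc
termination_by m.length
decreasing_by
  all_goals
    simp only [List.filter_cons, bne_self_eq_false, List.length_cons]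
    exact Nat.lt_succ_of_le (List.length_filter_le _ _)

def dominant_class_py_alt (tool_classes : List String) (method : List String) : String :=
  if method ≠ [] then
    (bestLoopB method none 0).getD ""   -- the loop returns some _ on nonempty input
  else if tool_classes ≠ [] then
    tool_classes.headD ""
  else ""

-- ===== PRECONDITION & SPEC =====
def Spec_dominant_class_py (tool_classes : List String) (method : List String) (out : String) : Prop := out = dominant_class_py_alt tool_classes method
instance (tool_classes : List String) (method : List String) (out : String) : Decidable (Spec_dominant_class_py tool_classes method out) := by unfold Spec_dominant_class_py; infer_instance

-- ===== CLAIM (what is proved, stated in full; the proofs are below) =====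
def Claim_equal_dominant_class_py : Prop := ∀ (tool_classes : List String) (method : List String), Dom_dominant_class_py tool_classes method → Spec_dominant_class_py tool_classes method (dominant_class_py tool_classes method)

-- ===== LEMMAS AND PROOFS =====

-- Python max's running step (first strict maximum wins), as in PySem.List.max?.
def mstep (f : String → Int) (acc : Option String) (x : String) : Option String :=
  match acc with
  | none => some x
  | some m => if f m < f x then some x else some m

theorem max?_eq_foldl_mstep (f : String → Int) (l : List String) :
    PySem.List.max? l f = l.foldl (mstep f) none := by
  unfold PySem.List.max?
  congr 1
  funext acc x
  cases acc <;> rfl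

-- the running max only grows
theorem mstep_grow (f : String → Int) (s : List String) (m : String) :
    ∃ m', s.foldl (mstep f) (some m) = some m' ∧ f m ≤ f m' := by
  induction s generalizing m with
  | nil => exact ⟨m, rfl, le_refl _⟩
  | cons y s ih =>
    by_cases h : f m < f y
    · obtain ⟨m', hm', hle⟩ := ih y
      exact ⟨m', by simp [mstep, h, hm'], le_trans (le_of_lt h) hle⟩
    · obtain ⟨m', hm', hle⟩ := ih m
      exact ⟨m', by simp [mstep, h, hm'], hle⟩

-- after folding over s, the accumulator dominates every element of s
theorem mstep_isMax (f : String → Int) (s : List String) (b : Option String)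
    (x : String) (hx : x ∈ s) :
    ∃ m, s.foldl (mstep f) b = some m ∧ f x ≤ f m := by
  induction s generalizing b with
  | nil => cases hx
  | cons y s ih =>
    rcases List.mem_cons.mp hx with h | h
    · subst h
      cases b with
      | none =>
        obtain ⟨m', hm', hle⟩ := mstep_grow f s x
        exact ⟨m', by simpa [mstep] using hm', hle⟩
      | some m =>
        by_cases hlt : f m < f x
        · obtain ⟨m', hm', hle⟩ := mstep_grow f s x
          exact ⟨m', by simpa [mstep, hlt] using hm', hle⟩
        · obtain ⟨m', hm', hle⟩ := mstep_grow f s m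
          exact ⟨m', by simpa [mstep, hlt] using hm', le_trans (not_lt.mp hlt) hle⟩
    · exact ih (mstep (f := f) b y) h

-- folding the max step over the deduplicated list equals folding it over the full list
theorem foldl_mstep_ofList (f : String → Int) (l : List String) :
    ∀ (s : List String) (b : Option String),
      (l.foldl PySem.Set.add s).foldl (mstep f) b = l.foldl (mstep f) (s.foldl (mstep f) b) := by
  induction l with
  | nil => intro s b; rfl
  | cons x l ih =>
    intro s b
    have hstep : (PySem.Set.add s x).foldl (mstep f) b = mstep f (s.foldl (mstep f) b) x := by
      by_cases hx : x ∈ s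
      · obtain ⟨m, hm, hle⟩ := mstep_isMax f s b x hx
        simp [PySem.Set.add, hx, hm, mstep, not_lt.mpr hle]
      · simp [PySem.Set.add, hx, mstep]
    calc ((x :: l).foldl PySem.Set.add s).foldl (mstep f) b
        = (l.foldl PySem.Set.add (PySem.Set.add s x)).foldl (mstep f) b := rfl
      _ = l.foldl (mstep f) ((PySem.Set.add s x).foldl (mstep f) b) := ih _ _
      _ = l.foldl (mstep f) (mstep f (s.foldl (mstep f) b) x) := by rw [hstep]

theorem max?_ofList (f : String → Int) (l : List String) :
    PySem.List.max? (PySem.Set.ofList l) f = PySem.List.max? l f := by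
  rw [max?_eq_foldl_mstep, max?_eq_foldl_mstep, PySem.Set.ofList_eq_foldl]
  simpa using foldl_mstep_ofList f l [] none

-- later copies of h are no-ops for the max fold once the accumulator dominates f h
theorem foldl_mstep_filter (f : String → Int) (h : String) :
    ∀ (t : List String) (m : String), f h ≤ f m →
      t.foldl (mstep f) (some m) = (t.filter (fun x => x != h)).foldl (mstep f) (some m) := by
  intro t
  induction t with
  | nil => intro m _; rfl
  | cons a t ih =>
    intro m hm
    by_cases ha : a = h
    · subst ha
      have : mstep f (some m) a = some m := by
        simp [mstep, not_lt.mpr hm]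
      simp [this, ih m hm]
    · have ha' : (a != h) = true := by simp [ha]
      by_cases hlt : f m < f a
      · simp [ha', mstep, hlt, ih a (le_trans hm (le_of_lt hlt))]
      · simp [ha', mstep, hlt, ih m hm]

-- len(m) - len([x for x in m if x != h]) counts the copies of h
theorem length_sub_filter_eq_count (m : List String) (h : String) :
    ((m.length : Int) - ((m.filter (fun x => x != h)).length : Int))
      = (PySem.List.count m h : Int) := by
  unfold PySem.List.count
  induction m with
  | nil => simp
  | cons a t ih =>
    by_cases ha : a = h
    · subst ha
      simp only [List.filter_cons, bne_self_eq_false, List.length_cons,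
        List.count_cons_self]
      push_cast
      push_cast at ih
      omega
    · have ha' : (a != h) = true := by simp [ha]
      have hane : (a == h) = false := by simp [ha]
      simp only [List.filter_cons, ha', if_pos, List.length_cons,
        List.count_cons, hane, if_false]
      push_cast
      push_cast at ih
      omega

theorem count_filter_ne (m : List String) (h x : String) (hx : x ≠ h) :
    PySem.List.count (m.filter (fun y => y != h)) x = PySem.List.count m x := by
  unfold PySem.List.count
  induction m with
  | nil => rfl
  | cons a t ih =>
    by_cases ha : a = h
    · subst ha
      have hax : ¬ (a = x) := fun e => hx e.symm
      simp [List.filter_cons, List.count_cons, hax, ih]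
    · have ha' : (a != h) = true := by simp [ha]
      simp [List.filter_cons, ha', List.count_cons, ih]

-- the partition loop, given a frozen count function f valid on its list, is the max fold
theorem bestLoopB_invariant (f : String → Int) :
    ∀ (n : Nat) (m : List String) (v : String), m.length ≤ n →
      (∀ x ∈ m, (PySem.List.count m x : Int) = f x) →
      bestLoopB m (some v) (f v) = m.foldl (mstep f) (some v) := by
  intro n
  induction n with
  | zero =>
    intro m v hlen _
    have : m = [] := List.eq_nil_of_length_eq_zero (Nat.le_zero.mp hlen)
    subst this
    simp [bestLoopB]
  | succ n ih =>
    intro m v hlen hcnt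
    match m with
    | [] => simp [bestLoopB]
    | h :: t =>
      have hrest : (h :: t).filter (fun x => x != h) = t.filter (fun x => x != h) := by
        simp [List.filter_cons]
      have hch : ((((h :: t).length : Int)) - (((h :: t).filter (fun x => x != h)).length : Int))
          = f h := by
        rw [length_sub_filter_eq_count]
        exact hcnt h (List.mem_cons_self)
      have hlen' : (t.filter (fun x => x != h)).length ≤ n := by
        have := List.length_filter_le (fun x => x != h) t
        simp only [List.length_cons] at hlen
        omega
      have hcnt' : ∀ x ∈ (h :: t).filter (fun y => y != h),
          (PySem.List.count ((h :: t).filter (fun y => y != h)) x : Int) = f x := by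
        intro x hxmem
        have hxne : x ≠ h := by
          have := List.of_mem_filter hxmem
          simpa using this
        rw [count_filter_ne _ _ _ hxne]
        exact hcnt x (List.mem_of_mem_filter hxmem)
      rw [bestLoopB]
      simp only [hch]
      by_cases hlt : f v < f h
      · have hcond : ((some v : Option String) = none ∨ f v < f h) := Or.inr hlt
        rw [if_pos hcond]
        have hstep : (h :: t).foldl (mstep f) (some v) = t.foldl (mstep f) (some h) := by
          simp [List.foldl_cons, mstep, hlt]
        rw [hstep, foldl_mstep_filter f h t h (le_refl _), ← hrest]
        exact ih _ h (by rw [hrest]; exact hlen') hcnt'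
      · have hcond : ¬ ((some v : Option String) = none ∨ f v < f h) := by
          simp [hlt]
        rw [if_neg hcond]
        have hstep : (h :: t).foldl (mstep f) (some v) = t.foldl (mstep f) (some v) := by
          simp [List.foldl_cons, mstep, hlt]
        have hfh : f h ≤ f v := not_lt.mp hlt
        rw [hstep, foldl_mstep_filter f h t v hfh, ← hrest]
        exact ih _ v (by rw [hrest]; exact hlen') hcnt'

-- B's loop computes Python's max(method, key = count-in-method)
theorem bestLoopB_eq_max? (h : String) (t : List String) :
    bestLoopB (h :: t) none 0
      = PySem.List.max? (h :: t) (fun c => (PySem.List.count (h :: t) c : Int)) := by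
  set f : String → Int := fun c => (PySem.List.count (h :: t) c : Int) with hf
  have hrest : (h :: t).filter (fun x => x != h) = t.filter (fun x => x != h) := by
    simp [List.filter_cons]
  have hch : ((((h :: t).length : Int)) - (((h :: t).filter (fun x => x != h)).length : Int))
      = f h := by
    rw [length_sub_filter_eq_count]
  have hcnt' : ∀ x ∈ (h :: t).filter (fun y => y != h),
      (PySem.List.count ((h :: t).filter (fun y => y != h)) x : Int) = f x := by
    intro x hxmem
    have hxne : x ≠ h := by
      have := List.of_mem_filter hxmem
      simpa using this
    rw [count_filter_ne _ _ _ hxne]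
  rw [bestLoopB]
  simp only [hch]
  rw [if_pos (show True ∨ (0:Int) < f h from Or.inl trivial)]
  have hinv := bestLoopB_invariant f ((h :: t).filter (fun y => y != h)).length
      ((h :: t).filter (fun y => y != h)) h (le_refl _) hcnt'
  rw [hinv, max?_eq_foldl_mstep]
  have : (h :: t).foldl (mstep f) none = t.foldl (mstep f) (some h) := by
    simp [List.foldl_cons, mstep]
  rw [this, foldl_mstep_filter f h t h (le_refl _), hrest]

-- ===== VERDICT (by name: the statement is the Claim_ definition above) =====
theorem dominant_class_py_spec : Claim_equal_dominant_class_py := by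
  intro tool_classes method _
  unfold Spec_dominant_class_py dominant_class_py dominant_class_py_alt
  by_cases hm : method ≠ []
  · simp only [if_pos hm]
    rw [PySem.Dict.foldl_insert_getD_add_one_eq_counter, PySem.Dict.keys_counter]
    have hkey : (fun c => (PySem.Dict.counter method).getD c 0)
        = (fun c => (PySem.List.count method c : Int)) := by
      funext c
      rw [PySem.Dict.getD_counter]
      rfl
    rw [hkey, max?_ofList]
    match method, hm with
    | h :: t, _ => rw [bestLoopB_eq_max? h t]
  · simp [hm]
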